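-- pv_equiv track=rewrite | github.com/damir-gavric/ScanSweep | processor.py | normalize_double_quote_spacing
-- ===== SOURCE A (Python) =====
-- def normalize_double_quote_spacing(txt):
--     result = []
--     inside_quotes = False
--     i = 0
--     while i < len(txt):
--         char = txt[i]
--         if char == '"':
--             if inside_quotes:
--                 while result and result[-1] == " ":
--                     result.pop()
--                 result.append(char)
--                 inside_quotes = False
--                 i += 1
--                 continue
--
--             result.append(char)
--             inside_quotes = True
--             i += 1
--             while i < len(txt) and txt[i] == " ":
--                 i += 1
--             continue
--
--         result.append(char)
--         i += 1
--
--     return "".join(result)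
-- ===== SOURCE B (Python) =====
-- def normalize_double_quote_spacing(txt):
--     parts = txt.split('"')
--     out = []
--     quoted = False
--     for seg in parts:
--         out.append(seg.strip(' ') if quoted else seg)
--         quoted = not quoted
--     if len(parts) % 2 == 0:
--         # odd number of quotes: the final quoted region is unterminated,
--         # only its leading spaces are trimmed
--         out[-1] = parts[-1].lstrip(' ')
--     return '"'.join(out)
-- ===== Notes on version B (the rewrite author's own statement) =====
-- stated objective: simpler
-- what changed: Replaces A's stateful character-by-character scan (inside_quotes flag, space-skipping inner loop, trailing-space popping) by splitting on the double-quote character, stripping spaces from the quoted segments (lstrip only for an unterminated final segment), and rejoining.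
import Mathlib
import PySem

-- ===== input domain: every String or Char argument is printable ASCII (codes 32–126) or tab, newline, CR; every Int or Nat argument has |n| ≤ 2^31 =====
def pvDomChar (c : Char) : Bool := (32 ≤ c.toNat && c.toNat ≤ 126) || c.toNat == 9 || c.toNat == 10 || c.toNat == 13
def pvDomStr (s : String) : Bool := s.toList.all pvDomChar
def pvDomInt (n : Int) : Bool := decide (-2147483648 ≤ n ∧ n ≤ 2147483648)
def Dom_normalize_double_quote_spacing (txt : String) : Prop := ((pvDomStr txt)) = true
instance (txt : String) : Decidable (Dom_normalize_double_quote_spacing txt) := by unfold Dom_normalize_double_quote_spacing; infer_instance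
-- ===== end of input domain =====

-- B replaces A's stateful character scan by split-on-'"' / strip the quoted segments / rejoin (objective: simpler; same return value; measured faster by a constant factor: C-level split/strip/join instead of a per-character Python loop).

-- ===== PORT A =====
-- the inner `while result and result[-1] == " ": result.pop()` loop: each iteration
-- removes one trailing ' ', so it removes exactly the maximal all-space suffix (exact)
def pvPopSpaces (res : List Char) : List Char := (res.reverse.dropWhile (· == ' ')).reverse

-- the `while i < len(txt)` loop of A: state = (remaining input, inside_quotes, result)
def pvLoopA : List Char → Bool → List Char → List Char
  | [], _, res => res
  | c :: rest, inside, res =>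
    if c = '"' then
      if inside then
        pvLoopA rest false (pvPopSpaces res ++ ['"'])
      else
        -- append '"', then `while i < len(txt) and txt[i] == " ": i += 1` (= dropWhile)
        pvLoopA (rest.dropWhile (· == ' ')) true (res ++ ['"'])
    else
      pvLoopA rest inside (res ++ [c])
  termination_by l _ _ => l.length
  decreasing_by
  · simp
  · exact Nat.lt_succ_of_le (List.length_dropWhile_le _ _)
  · simp

def normalize_double_quote_spacing (txt : String) : String :=
  String.ofList (pvLoopA txt.toList false [])

-- ===== PORT B =====
-- exact port of str.lstrip(' '): drop leading ' ' characters (no PySem primitive takes a chars argument for lstrip)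
def pvLstripSp (s : List Char) : List Char := s.dropWhile (· == ' ')

def normalize_double_quote_spacing_alt (txt : String) : String :=
  let parts := PySem.Chars.splitOn txt.toList ['"']
  let st := parts.foldl
    (fun (st : List (List Char) × Bool) seg =>
      (st.1 ++ [if st.2 then PySem.Chars.stripChars seg [' '] else seg], !st.2))
    ([], false)
  let out := if parts.length % 2 = 0
    then st.1.dropLast ++ [pvLstripSp (parts.getLastD [])]   -- out[-1] = parts[-1].lstrip(' ')
    else st.1
  String.ofList (PySem.Chars.join ['"'] out)

-- ===== PRECONDITION & SPEC =====
def Spec_normalize_double_quote_spacing (txt : String) (out : String) : Prop := out = normalize_double_quote_spacing_alt txt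
instance (txt : String) (out : String) : Decidable (Spec_normalize_double_quote_spacing txt out) := by unfold Spec_normalize_double_quote_spacing; infer_instance

-- ===== CLAIM (what is proved, stated in full; the proofs are below) =====
def Claim_equal_normalize_double_quote_spacing : Prop := ∀ (txt : String), Dom_normalize_double_quote_spacing txt → Spec_normalize_double_quote_spacing txt (normalize_double_quote_spacing txt)

-- ===== LEMMAS AND PROOFS =====

-- rstrip(' ') on a char list (proof-side abbreviation)
def pvRstrip (s : List Char) : List Char := (s.reverse.dropWhile (· == ' ')).reverse

-- structural version of str.split('"')
def pvSplitQ : List Char → List (List Char)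
  | [] => [[]]
  | c :: rest =>
    if c = '"' then [] :: pvSplitQ rest
    else
      match pvSplitQ rest with
      | [] => [[c]]
      | s :: ss => (c :: s) :: ss

def pvConsHead (m : List Char) : List (List Char) → List (List Char)
  | [] => [m]
  | p :: ps => (m ++ p) :: ps

-- pure characterisation of A's loop: pvB0 = outside quotes, pvB1 mid = inside quotes with
-- interior-so-far mid (leading spaces already skipped)
mutual
def pvB0 : List Char → List Char
  | [] => []
  | c :: rest =>
    if c = '"' then '"' :: pvB1 [] (rest.dropWhile (· == ' ')) else c :: pvB0 rest
  termination_by l => l.length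
  decreasing_by
  · exact Nat.lt_succ_of_le (List.length_dropWhile_le _ _)
  · simp
def pvB1 : List Char → List Char → List Char
  | mid, [] => mid
  | mid, c :: rest =>
    if c = '"' then pvRstrip mid ++ '"' :: pvB0 rest else pvB1 (mid ++ [c]) rest
  termination_by _ l => l.length
  decreasing_by
  · simp
  · simp
end

-- pure characterisation of B's join: flag = current segment is a quoted interior
def pvK : Bool → List (List Char) → List Char
  | _, [] => []
  | q, [p] => if q then pvLstripSp p else p
  | q, p :: ps => (if q then pvRstrip (pvLstripSp p) else p) ++ '"' :: pvK (!q) ps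

def pvAltMap : Bool → List (List Char) → List (List Char)
  | _, [] => []
  | q, p :: ps => (if q then PySem.Chars.stripChars p [' '] else p) :: pvAltMap (!q) ps

lemma pvStripChars_eq (s : List Char) : PySem.Chars.stripChars s [' '] = pvRstrip (pvLstripSp s) := by
  simp only [PySem.Chars.stripChars, pvRstrip, pvLstripSp]
  rw [show (fun c : Char => [' '].contains c) = (fun x : Char => x == ' ') from by
    funext c; simp; exact (Bool.beq_eq_decide_eq c ' ').symm]

lemma pvSplitQ_ne_nil (l : List Char) : pvSplitQ l ≠ [] := by
  cases l with
  | nil => simp [pvSplitQ]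
  | cons c rest =>
    simp only [pvSplitQ]
    split
    · simp
    · split <;> simp

lemma pvGo (fuel : Nat) : ∀ (l cur : List Char) (acc : List (List Char)), l.length ≤ fuel →
    PySem.Chars.splitOn.go ['"'] fuel l cur acc = acc.reverse ++ pvConsHead cur.reverse (pvSplitQ l) := by
  induction fuel with
  | zero =>
    intro l cur acc h
    have : l = [] := by cases l <;> simp_all
    subst this
    simp [PySem.Chars.splitOn.go, pvSplitQ, pvConsHead]
  | succ n ih =>
    intro l cur acc h
    cases l with
    | nil => simp [PySem.Chars.splitOn.go, pvSplitQ, pvConsHead]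
    | cons c rest =>
      by_cases hc : c = '"'
      · subst hc
        rw [show PySem.Chars.splitOn.go ['"'] (n+1) ('"' :: rest) cur acc
              = PySem.Chars.splitOn.go ['"'] n rest [] (cur.reverse :: acc) from by
            simp [PySem.Chars.splitOn.go, List.isPrefixOf]]
        rw [ih rest [] (cur.reverse :: acc) (by simpa using Nat.lt_succ_iff.mp (by simpa using h))]
        simp only [pvSplitQ, if_true]
        cases hsp : pvSplitQ rest with
        | nil => exact absurd hsp (pvSplitQ_ne_nil rest)
        | cons s ss => simp [pvConsHead]
      · rw [show PySem.Chars.splitOn.go ['"'] (n+1) (c :: rest) cur acc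
              = PySem.Chars.splitOn.go ['"'] n rest (c :: cur) acc from by
            simp [PySem.Chars.splitOn.go, List.isPrefixOf, Ne.symm hc]]
        rw [ih rest (c :: cur) acc (by simpa using Nat.lt_succ_iff.mp (by simpa using h))]
        simp only [pvSplitQ, if_neg hc]
        cases hsp : pvSplitQ rest with
        | nil => exact absurd hsp (pvSplitQ_ne_nil rest)
        | cons s ss => simp [pvConsHead]

lemma pvSplitOn_eq (l : List Char) : PySem.Chars.splitOn l ['"'] = pvSplitQ l := by
  rw [PySem.Chars.splitOn, pvGo (l.length+1) l [] [] (by omega)]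
  simp only [List.reverse_nil, List.nil_append]
  cases hsp : pvSplitQ l with
  | nil => exact absurd hsp (pvSplitQ_ne_nil l)
  | cons s ss => simp [pvConsHead]

lemma pvLstrip_noop {mid : List Char} (h : mid.head? ≠ some ' ') : pvLstripSp mid = mid := by
  cases mid with
  | nil => rfl
  | cons m t =>
    simp only [List.head?_cons, ne_eq, Option.some.injEq] at h
    simp [pvLstripSp, h]

lemma pvHeadDropWhile (p : Char → Bool) (r : List Char) :
    ∀ c, (r.dropWhile p).head? = some c → p c = false := by
  induction r with
  | nil => intro c h; simp at h
  | cons a t ih =>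
    intro c h
    rw [List.dropWhile_cons] at h
    split at h
    · exact ih c h
    · rename_i hpa
      simp at h; subst h; simpa using hpa

lemma pvHeadDropWhileSp (r : List Char) : (r.dropWhile (· == ' ')).head? ≠ some ' ' := by
  intro h
  have := pvHeadDropWhile (· == ' ') r ' ' h
  simp at this

lemma pvPopSpaces_append {x mid : List Char} (hx : x.getLast? = some '"')
    (hm : mid.head? ≠ some ' ') : pvPopSpaces (x ++ mid) = x ++ pvRstrip mid := by
  have hxdrop : List.dropWhile (· == ' ') x.reverse = x.reverse := by
    cases hxe : x.reverse with
    | nil => simp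
    | cons a t =>
      have ha : a = '"' := by
        have h2 := List.head?_reverse (l := x)
        rw [hxe, hx] at h2; simpa using h2
      subst ha
      rw [List.dropWhile_cons]
      simp
  cases mid with
  | nil =>
    simp only [List.append_nil, pvPopSpaces, pvRstrip, hxdrop]
    simp
  | cons m t =>
    have hmne : (m == ' ') = false := by
      simp only [List.head?_cons, ne_eq, Option.some.injEq] at hm
      simpa using hm
    have hne : List.dropWhile (· == ' ') (m :: t).reverse ≠ [] := by
      intro h
      rw [List.dropWhile_eq_nil_iff] at h
      have := h m (by simp)
      rw [hmne] at this; exact Bool.false_ne_true this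
    simp only [pvPopSpaces, pvRstrip, List.reverse_append, List.dropWhile_append]
    rw [if_neg (by simpa [List.isEmpty_iff] using hne)]
    simp

-- A's loop equals the pure functions (strong induction on the length of the remaining input)
lemma pvLoopA_eq_aux : ∀ (n : Nat) (l : List Char), l.length = n →
    (∀ res, pvLoopA l false res = res ++ pvB0 l) ∧
    (∀ x mid, x.getLast? = some '"' → (mid ++ l).head? ≠ some ' ' →
      pvLoopA l true (x ++ mid) = x ++ pvB1 mid l) := by
  intro n
  induction n using Nat.strong_induction_on with
  | _ n ih =>
    intro l hl
    cases l with
    | nil =>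
      constructor
      · intro res; simp [pvLoopA, pvB0]
      · intro x mid _ _; simp [pvLoopA, pvB1]
    | cons c rest =>
      subst hl
      constructor
      · intro res
        by_cases hc : c = '"'
        · subst hc
          rw [show pvLoopA ('"' :: rest) false res
                = pvLoopA (rest.dropWhile (· == ' ')) true (res ++ ['"']) from by
              simp [pvLoopA]]
          have hq := (ih (rest.dropWhile (· == ' ')).length
            (Nat.lt_succ_of_le (List.length_dropWhile_le _ _)) _ rfl).2
          have := hq (res ++ ['"']) []
            (by simp) (by simpa using pvHeadDropWhileSp rest)
          simp only [List.append_nil] at this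
          rw [this]
          simp [pvB0]
        · rw [show pvLoopA (c :: rest) false res = pvLoopA rest false (res ++ [c]) from by
              simp [pvLoopA, hc]]
          rw [(ih rest.length (by simp) rest rfl).1 (res ++ [c])]
          simp [pvB0, hc]
      · intro x mid hx hm
        by_cases hc : c = '"'
        · subst hc
          have hmid : mid.head? ≠ some ' ' := by
            cases mid with
            | nil => simp
            | cons m t => simpa using hm
          rw [show pvLoopA ('"' :: rest) true (x ++ mid)
                = pvLoopA rest false (pvPopSpaces (x ++ mid) ++ ['"']) from by
              simp [pvLoopA]]
          rw [pvPopSpaces_append hx hmid]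
          rw [(ih rest.length (by simp) rest rfl).1 (x ++ pvRstrip mid ++ ['"'])]
          simp [pvB1]
        · rw [show pvLoopA (c :: rest) true (x ++ mid)
                = pvLoopA rest true ((x ++ mid) ++ [c]) from by
              simp [pvLoopA, hc]]
          rw [List.append_assoc]
          rw [(ih rest.length (by simp) rest rfl).2 x (mid ++ [c]) hx
            (by simpa using hm)]
          simp [pvB1, hc]

-- dropping the leading spaces of a quoted interior does not change B's value for it
lemma pvK_splitQ_dropWhile (r : List Char) :
    pvK true (pvSplitQ (r.dropWhile (· == ' '))) = pvK true (pvSplitQ r) := by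
  induction r with
  | nil => rfl
  | cons a t ih =>
    by_cases ha : a = ' '
    · subst ha
      rw [show List.dropWhile (· == ' ') (' ' :: t) = List.dropWhile (· == ' ') t from by
        simp]
      rw [ih]
      have hsq : pvSplitQ (' ' :: t) = pvConsHead [' '] (pvSplitQ t) := by
        simp only [pvSplitQ, if_neg (by decide : ¬ (' ' = '"'))]
        cases hsp : pvSplitQ t with
        | nil => exact absurd hsp (pvSplitQ_ne_nil t)
        | cons s ss => simp [pvConsHead]
      rw [hsq]
      cases hsp : pvSplitQ t with
      | nil => exact absurd hsp (pvSplitQ_ne_nil t)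
      | cons s ss =>
        cases ss with
        | nil => simp [pvConsHead, pvK, pvLstripSp]
        | cons s' ss' => simp [pvConsHead, pvK, pvLstripSp]
    · rw [show List.dropWhile (· == ' ') (a :: t) = a :: t from by
        simp [ha]]

-- B's pure characterisation over pvSplitQ (strong induction on the length of the input)
lemma pvB_eq_K_aux : ∀ (n : Nat) (l : List Char), l.length = n →
    (pvB0 l = pvK false (pvSplitQ l)) ∧
    (∀ mid, (mid ++ l).head? ≠ some ' ' →
      pvB1 mid l = pvK true (pvConsHead mid (pvSplitQ l))) := by
  intro n
  induction n using Nat.strong_induction_on with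
  | _ n ih =>
    intro l hl
    cases l with
    | nil =>
      constructor
      · simp [pvB0, pvSplitQ, pvK]
      · intro mid hm
        simp only [List.append_nil] at hm
        simp [pvB1, pvSplitQ, pvConsHead, pvK, pvLstrip_noop hm]
    | cons c rest =>
      subst hl
      have hrest := ih rest.length (by simp) rest rfl
      constructor
      · by_cases hc : c = '"'
        · subst hc
          rw [show pvB0 ('"' :: rest) = '"' :: pvB1 [] (rest.dropWhile (· == ' ')) from by
            simp [pvB0]]
          have hdw := (ih (rest.dropWhile (· == ' ')).length
            (Nat.lt_succ_of_le (List.length_dropWhile_le _ _)) _ rfl).2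
          rw [hdw [] (by simpa using pvHeadDropWhileSp rest)]
          have h1 : pvConsHead [] (pvSplitQ (rest.dropWhile (· == ' ')))
              = pvSplitQ (rest.dropWhile (· == ' ')) := by
            cases hsp : pvSplitQ (rest.dropWhile (· == ' ')) with
            | nil => exact absurd hsp (pvSplitQ_ne_nil _)
            | cons s ss => simp [pvConsHead]
          rw [h1, pvK_splitQ_dropWhile]
          rw [show pvSplitQ ('"' :: rest) = [] :: pvSplitQ rest from by
            simp [pvSplitQ]]
          cases hsp : pvSplitQ rest with
          | nil => exact absurd hsp (pvSplitQ_ne_nil rest)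
          | cons s ss => simp [pvK]
        · rw [show pvB0 (c :: rest) = c :: pvB0 rest from by simp [pvB0, hc]]
          rw [hrest.1]
          rw [show pvSplitQ (c :: rest)
                = match pvSplitQ rest with
                  | [] => [[c]]
                  | s :: ss => (c :: s) :: ss from by simp [pvSplitQ, hc]]
          cases hsp : pvSplitQ rest with
          | nil => exact absurd hsp (pvSplitQ_ne_nil rest)
          | cons s ss =>
            cases ss with
            | nil => simp [pvK]
            | cons s' ss' => simp [pvK]
      · intro mid hm
        have hmid : mid.head? ≠ some ' ' := by
          cases mid with
          | nil => simp
          | cons m t => simpa using hm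
        by_cases hc : c = '"'
        · subst hc
          rw [show pvB1 mid ('"' :: rest) = pvRstrip mid ++ '"' :: pvB0 rest from by
            simp [pvB1]]
          rw [hrest.1]
          rw [show pvSplitQ ('"' :: rest) = [] :: pvSplitQ rest from by simp [pvSplitQ]]
          rw [show pvConsHead mid ([] :: pvSplitQ rest) = mid :: pvSplitQ rest from by
            simp [pvConsHead]]
          cases hsp : pvSplitQ rest with
          | nil => exact absurd hsp (pvSplitQ_ne_nil rest)
          | cons s ss =>
            simp [pvK, pvLstrip_noop hmid]
        · rw [show pvB1 mid (c :: rest) = pvB1 (mid ++ [c]) rest from by simp [pvB1, hc]]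
          rw [hrest.2 (mid ++ [c]) (by simpa using hm)]
          rw [show pvSplitQ (c :: rest)
                = match pvSplitQ rest with
                  | [] => [[c]]
                  | s :: ss => (c :: s) :: ss from by simp [pvSplitQ, hc]]
          cases hsp : pvSplitQ rest with
          | nil => exact absurd hsp (pvSplitQ_ne_nil rest)
          | cons s ss => simp [pvConsHead]

lemma pvFoldl_eq (parts : List (List Char)) : ∀ (acc : List (List Char)) (q : Bool),
    parts.foldl
      (fun (st : List (List Char) × Bool) seg =>
        (st.1 ++ [if st.2 then PySem.Chars.stripChars seg [' '] else seg], !st.2))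
      (acc, q) = (acc ++ pvAltMap q parts, if parts.length % 2 = 0 then q else !q) := by
  induction parts with
  | nil => intro acc q; simp [pvAltMap]
  | cons p ps ih =>
    intro acc q
    rw [List.foldl_cons, ih]
    simp only [Prod.mk.injEq]
    constructor
    · simp [pvAltMap]
    · simp only [List.length_cons]
      rcases Nat.even_or_odd ps.length with he | ho
      · have h0 : ps.length % 2 = 0 := Nat.even_iff.mp he
        have h1 : ¬ ((ps.length + 1) % 2 = 0) := by omega
        simp [h0, h1]
      · have h0 : ¬ (ps.length % 2 = 0) := by
          have := Nat.odd_iff.mp ho; omega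
        have h1 : (ps.length + 1) % 2 = 0 := by
          have := Nat.odd_iff.mp ho; omega
        simp [h0, h1]

lemma pvGetLastD_cons_ne {ps : List (List Char)} (p : List Char) (h : ps ≠ []) :
    (p :: ps).getLastD [] = ps.getLastD [] := by
  cases ps with
  | nil => exact absurd rfl h
  | cons s ss => simp

lemma pvAltMap_ne_nil (q : Bool) {ps : List (List Char)} (h : ps ≠ []) : pvAltMap q ps ≠ [] := by
  cases ps with
  | nil => exact absurd rfl h
  | cons p t => simp [pvAltMap]

lemma pvK_eq_join (parts : List (List Char)) : ∀ q, parts ≠ [] →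
    pvK q parts = PySem.Chars.join ['"']
      (if xor q (decide (parts.length % 2 = 0)) = true
        then (pvAltMap q parts).dropLast ++ [pvLstripSp (parts.getLastD [])]
        else pvAltMap q parts) := by
  induction parts with
  | nil => intro q h; exact absurd rfl h
  | cons p ps ih =>
    intro q _
    cases ps with
    | nil =>
      cases q with
      | false => simp [pvK, pvAltMap, PySem.Chars.join_singleton]
      | true => simp [pvK, pvAltMap, PySem.Chars.join_singleton]
    | cons s ss =>
      have hps : (s :: ss : List (List Char)) ≠ [] := by simp
      have hcond : xor q (decide ((p :: s :: ss).length % 2 = 0))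
          = xor (!q) (decide ((s :: ss).length % 2 = 0)) := by
        simp only [List.length_cons]
        rcases Nat.even_or_odd (s :: ss).length with he | ho
        · have h0 : (s :: ss).length % 2 = 0 := Nat.even_iff.mp he
          have h1 : ¬ (((s :: ss).length + 1) % 2 = 0) := by omega
          simp only [List.length_cons] at h0 h1
          simp [h0, h1]
        · have h0 : ¬ ((s :: ss).length % 2 = 0) := by
            have := Nat.odd_iff.mp ho; omega
          have h1 : ((s :: ss).length + 1) % 2 = 0 := by
            have := Nat.odd_iff.mp ho; omega
          simp only [List.length_cons] at h0 h1
          simp [h0, h1]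
      rw [show pvK q (p :: s :: ss)
            = (if q then pvRstrip (pvLstripSp p) else p) ++ '"' :: pvK (!q) (s :: ss) from by
          simp [pvK]]
      rw [ih (!q) hps, hcond]
      rw [show pvAltMap q (p :: s :: ss)
            = (if q then PySem.Chars.stripChars p [' '] else p) :: pvAltMap (!q) (s :: ss) from by
          simp [pvAltMap]]
      rw [pvGetLastD_cons_ne p hps, pvStripChars_eq]
      set h0 : List Char := if q then pvRstrip (pvLstripSp p) else p with hh0
      by_cases hx : xor (!q) (decide ((s :: ss).length % 2 = 0)) = true
      · rw [if_pos hx, if_pos hx]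
        rw [List.dropLast_cons_of_ne_nil (pvAltMap_ne_nil (!q) hps)]
        cases hrest : (pvAltMap (!q) (s :: ss)).dropLast ++ [pvLstripSp ((s :: ss).getLastD [])] with
        | nil => simp at hrest
        | cons b t =>
          rw [show (h0 :: (pvAltMap (!q) (s :: ss)).dropLast
                ++ [pvLstripSp ((s :: ss).getLastD [])]) = h0 :: b :: t from by
            rw [List.cons_append, hrest]]
          rw [PySem.Chars.join_cons_cons, ← hrest]
          simp
      · rw [if_neg hx, if_neg hx]
        cases hrest : pvAltMap (!q) (s :: ss) with
        | nil => exact absurd hrest (pvAltMap_ne_nil (!q) hps)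
        | cons b t =>
          rw [PySem.Chars.join_cons_cons]
          simp

-- ===== VERDICT (by name: the statement is the Claim_ definition above) =====
theorem normalize_double_quote_spacing_spec : Claim_equal_normalize_double_quote_spacing := by
  intro txt _
  unfold Spec_normalize_double_quote_spacing normalize_double_quote_spacing
  have hA := (pvLoopA_eq_aux txt.toList.length txt.toList rfl).1 []
  simp only [List.nil_append] at hA
  rw [hA, (pvB_eq_K_aux txt.toList.length txt.toList rfl).1]
  simp only [normalize_double_quote_spacing_alt, pvSplitOn_eq, pvFoldl_eq, List.nil_append]
  rw [pvK_eq_join (pvSplitQ txt.toList) false (pvSplitQ_ne_nil txt.toList)]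
  by_cases hp : (pvSplitQ txt.toList).length % 2 = 0
  · simp [hp]
  · simp [hp]
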